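-- pv_equiv track=rewrite | github.com/godfredO/dsa | threeNumberSort.py | threeNumberSortIII
-- ===== SOURCE A (Python) =====
-- def threeNumberSortIII(array,order):
--     firstValue = order[0]
--     secondValue = order[1]
--
--
--     f,s,t = 0,0,len(array)-1  #pointer for first, second, third order value instances
--
--     while s <= t:
--         value = array[s]
--
--         if value == secondValue:
--             s += 1
--         elif value == firstValue:
--             swap(array,s,f)
--             f += 1
--             s += 1
--         else:
--             swap(array,s,t)
--             t -= 1
--     return array
--
-- def swap(array, i, j):
--     array[i], array[j] = array[j], array[i]
-- ===== SOURCE B (Python) =====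
-- def threeNumberSortIII(array, order):
--     first, second = order[0], order[1]
--     c1 = c2 = 0
--     back = []  # values that belong behind the first two groups
--     lo, hi = 0, len(array) - 1
--     while lo <= hi:
--         value = array[lo]
--         if value == second:
--             c2 += 1
--             lo += 1
--         elif value == first:
--             c1 += 1
--             lo += 1
--         else:
--             # send it to the back and refill the slot from the right end;
--             # the back therefore fills up right-to-left, so reverse at the end
--             back.append(value)
--             array[lo] = array[hi]
--             hi -= 1
--     array[:] = [first] * c1 + [second] * c2 + back[::-1]
--     return array
-- ===== Notes on version B (the rewrite author's own statement) =====
-- stated objective: alternative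
-- what changed: B drops A's three-pointer swap partition (f/s/t pointers, swap helper, blocks maintained in place): it counts the first two order values, moves the remaining values aside with a hole-filling partition (overwrite array[lo] from array[hi], no swaps, no first-block pointer), and rebuilds the array as one concatenation of the two counted blocks and the reversed collected list.
import Mathlib
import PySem

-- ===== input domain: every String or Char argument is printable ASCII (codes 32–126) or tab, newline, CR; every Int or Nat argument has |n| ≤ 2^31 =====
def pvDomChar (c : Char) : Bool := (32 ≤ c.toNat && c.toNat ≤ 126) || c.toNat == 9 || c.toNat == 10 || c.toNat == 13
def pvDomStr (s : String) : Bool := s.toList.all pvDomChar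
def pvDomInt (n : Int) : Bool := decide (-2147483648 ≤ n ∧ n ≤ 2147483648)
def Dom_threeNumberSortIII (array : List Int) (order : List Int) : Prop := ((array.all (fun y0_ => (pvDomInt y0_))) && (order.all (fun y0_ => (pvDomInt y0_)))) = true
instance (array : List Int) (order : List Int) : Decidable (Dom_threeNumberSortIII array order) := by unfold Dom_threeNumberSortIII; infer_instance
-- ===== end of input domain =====

-- B replaces A's three-pointer Dutch-flag swap partition by a hole-filling partition that
-- only counts the first two values, collects the remaining values in a list, and rebuilds
-- the array as one concatenation (objective: alternative). Both Pythons mutate `array` to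
-- the same final content; the equivalence proved here is about the RETURN value.

-- ===== PORT A =====
-- swap(array, i, j): indices are always nonnegative and in range at every call site of
-- the loop below, so pyGetD/pySetD are exact there.
def pvSwap (a : List Int) (i j : Int) : List Int :=
  let xi := PySem.List.pyGetD a i 0
  let xj := PySem.List.pyGetD a j 0
  PySem.List.pySetD (PySem.List.pySetD a i xj) j xi

-- the while loop of A: f, s, t pointers; checks value == secondValue first, then firstValue
def pvLoopA (a : List Int) (firstV secondV : Int) (f s t : Int) : List Int :=
  if h : s ≤ t then
    let v := PySem.List.pyGetD a s 0
    if v = secondV then pvLoopA a firstV secondV f (s + 1) t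
    else if v = firstV then pvLoopA (pvSwap a s f) firstV secondV (f + 1) (s + 1) t
    else pvLoopA (pvSwap a s t) firstV secondV f s (t - 1)
  else a
termination_by (t + 1 - s).toNat
decreasing_by all_goals omega

def threeNumberSortIII (array : List Int) (order : List Int) : List Int :=
  -- order[0] / order[1]: Python raises IndexError when missing (outside Pre_)
  match PySem.List.pyGet? order 0, PySem.List.pyGet? order 1 with
  | some firstV, some secondV => pvLoopA array firstV secondV 0 0 ((array.length : Int) - 1)
  | _, _ => array

-- ===== PORT B =====
-- the while loop of B: checks value == second first, then first; on other values it
-- appends to `back` and refills the slot at lo from the right end (array[lo] = array[hi])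
def pvLoopB (a : List Int) (firstV secondV : Int) (c1 c2 : Nat) (back : List Int)
    (lo hi : Int) : Nat × Nat × List Int :=
  if h : lo ≤ hi then
    let v := PySem.List.pyGetD a lo 0
    if v = secondV then pvLoopB a firstV secondV c1 (c2 + 1) back (lo + 1) hi
    else if v = firstV then pvLoopB a firstV secondV (c1 + 1) c2 back (lo + 1) hi
    else pvLoopB (PySem.List.pySetD a lo (PySem.List.pyGetD a hi 0)) firstV secondV
        c1 c2 (back ++ [v]) lo (hi - 1)
  else (c1, c2, back)
termination_by (hi + 1 - lo).toNat
decreasing_by all_goals omega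

def threeNumberSortIII_alt (array : List Int) (order : List Int) : List Int :=
  -- order[0] / order[1]: Python raises IndexError when missing (outside Pre_)
  ((PySem.List.pyGet? order 0).bind fun firstV =>
   (PySem.List.pyGet? order 1).map fun secondV =>
     let r := pvLoopB array firstV secondV 0 0 [] 0 ((array.length : Int) - 1)
     List.replicate r.1 firstV ++ List.replicate r.2.1 secondV ++ r.2.2.reverse).getD array

-- ===== PRECONDITION & SPEC =====
-- Pre_ excludes exactly the inputs on which both Pythons raise IndexError (order shorter
-- than the two entries read before the loop).
def Pre_threeNumberSortIII (array : List Int) (order : List Int) : Prop :=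
  2 ≤ order.length
instance (array : List Int) (order : List Int) : Decidable (Pre_threeNumberSortIII array order) := by
  unfold Pre_threeNumberSortIII; infer_instance

def pvWitness_threeNumberSortIII : List Int × List Int := ([2, 0, 7, 1, 0, 2], [0, 1, 2])

def Spec_threeNumberSortIII (array : List Int) (order : List Int) (out : List Int) : Prop := out = threeNumberSortIII_alt array order
instance (array : List Int) (order : List Int) (out : List Int) : Decidable (Spec_threeNumberSortIII array order out) := by unfold Spec_threeNumberSortIII; infer_instance

-- ===== CLAIM (what is proved, stated in full; the proofs are below) =====
def Claim_equal_threeNumberSortIII : Prop := ∀ (array : List Int) (order : List Int), Dom_threeNumberSortIII array order → Pre_threeNumberSortIII array order → Spec_threeNumberSortIII array order (threeNumberSortIII array order)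

-- ===== LEMMAS AND PROOFS =====

theorem pv_getD_set (a : List Int) (n m : Nat) (v : Int) :
    (a.set n v).getD m 0 = if n = m ∧ n < a.length then v else a.getD m 0 := by
  by_cases hm : m < a.length
  · rw [List.getD_eq_getElem _ _ (by simpa using hm), List.getD_eq_getElem _ _ hm,
      List.getElem_set]
    by_cases hnm : n = m
    · subst hnm; simp [hm]
    · simp [hnm]
  · rw [List.getD_eq_default _ _ (by simpa using (Nat.le_of_not_lt hm)),
      List.getD_eq_default _ _ (Nat.le_of_not_lt hm)]
    have : ¬ (n = m ∧ n < a.length) := by omega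
    simp [this]

theorem pvSwap_eq (a : List Int) (i j : Int) (hi : 0 ≤ i) (hj : 0 ≤ j) :
    pvSwap a i j = (a.set i.toNat (a.getD j.toNat 0)).set j.toNat (a.getD i.toNat 0) := by
  show PySem.List.pySetD (PySem.List.pySetD a i (PySem.List.pyGetD a j 0)) j
      (PySem.List.pyGetD a i 0) = _
  rw [PySem.List.pyGetD_of_nonneg _ _ hi, PySem.List.pyGetD_of_nonneg _ _ hj,
    PySem.List.pySetD_of_nonneg _ _ hi, PySem.List.pySetD_of_nonneg _ _ hj]

theorem pvSwap_getD (a : List Int) (i j : Int) (hi : 0 ≤ i) (hj : 0 ≤ j)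
    (hi' : i < (a.length : Int)) (hj' : j < (a.length : Int)) (m : Nat) :
    (pvSwap a i j).getD m 0 =
      if j.toNat = m then a.getD i.toNat 0
      else if i.toNat = m then a.getD j.toNat 0
      else a.getD m 0 := by
  rw [pvSwap_eq a i j hi hj, pv_getD_set, pv_getD_set]
  by_cases h1 : j.toNat = m
  · simp [h1]; intro h; omega
  · simp only [h1, false_and, if_false]
    by_cases h2 : i.toNat = m
    · have : i.toNat = m ∧ i.toNat < a.length := ⟨h2, by omega⟩
      have hm : m < a.length := by omega
      simp [this, hm]
    · simp [h2]

theorem pvSwap_length (a : List Int) (i j : Int) : (pvSwap a i j).length = a.length := by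
  unfold pvSwap
  simp [PySem.List.length_pySetD]

theorem pvSwap_drop (a : List Int) (i j : Int) (hi : 0 ≤ i) (hj : 0 ≤ j) (d : Nat)
    (hid : i.toNat < d) (hjd : j.toNat < d) :
    (pvSwap a i j).drop d = a.drop d := by
  rw [pvSwap_eq a i j hi hj, List.drop_set_of_lt hjd, List.drop_set_of_lt hid]

-- a list that is firstV on [0,p) and secondV on [p,p+q) is two blocks plus its own tail
theorem pv_eq_blocks (a : List Int) (fv sv : Int) (p q : Nat) (hpq : p + q ≤ a.length)
    (h1 : ∀ i, i < p → a.getD i 0 = fv)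
    (h2 : ∀ i, p ≤ i → i < p + q → a.getD i 0 = sv) :
    a = List.replicate p fv ++ List.replicate q sv ++ a.drop (p + q) := by
  apply List.ext_getElem
  · simp; omega
  · intro i hi1 hi2
    rw [← List.getD_eq_getElem a 0 hi1]
    rcases Nat.lt_or_ge i p with hp | hp
    · rw [h1 i hp]
      rw [List.getElem_append_left (by simp; omega), List.getElem_append_left (by simpa using hp)]
      simp
    · rcases Nat.lt_or_ge i (p + q) with hq | hq
      · rw [h2 i hp hq]
        rw [List.getElem_append_left (by simp; omega),
          List.getElem_append_right (by simpa using hp)]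
        simp
      · rw [List.getElem_append_right (by simp; omega)]
        rw [List.getD_eq_getElem a 0 hi1]
        simp only [List.getElem_drop, List.length_append, List.length_replicate]
        congr 1
        omega

-- simulation invariant: A's Dutch-flag state (a, f, s, t) against B's hole-filling state
-- (b, c1, c2, back, lo = s, hi = t); a and b agree on the active window [s, t], A's two
-- finished blocks are counted by c1/c2, and A's finished tail is back reversed
theorem pvLoop_sim (fv sv : Int) :
    ∀ (k : Nat) (a b : List Int) (f s t : Int) (c1 c2 : Nat) (back : List Int),
      (t + 1 - s).toNat = k →
      0 ≤ f → f ≤ s → s ≤ t + 1 → t < (a.length : Int) → b.length = a.length →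
      c1 = f.toNat → c2 = (s - f).toNat →
      (∀ i : Nat, i < f.toNat → a.getD i 0 = fv) →
      (∀ i : Nat, f.toNat ≤ i → i < s.toNat → a.getD i 0 = sv) →
      a.drop (t + 1).toNat = back.reverse →
      (∀ i : Nat, s.toNat ≤ i → i < (t + 1).toNat → a.getD i 0 = b.getD i 0) →
      pvLoopA a fv sv f s t =
        List.replicate (pvLoopB b fv sv c1 c2 back s t).1 fv ++
        List.replicate (pvLoopB b fv sv c1 c2 back s t).2.1 sv ++
        (pvLoopB b fv sv c1 c2 back s t).2.2.reverse := by
  intro k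
  induction k with
  | zero =>
    intro a b f s t c1 c2 back hk h0f hfs hst1 htlen hblen hc1 hc2 hpre hmid htail hwin
    have hst : ¬ s ≤ t := by omega
    have hAx : pvLoopA a fv sv f s t = a := by rw [pvLoopA]; simp [hst]
    have hBx : pvLoopB b fv sv c1 c2 back s t = (c1, c2, back) := by
      rw [pvLoopB]; simp [hst]
    rw [hAx, hBx, hc1, hc2, ← htail]
    have hdt : (t + 1).toNat = f.toNat + (s - f).toNat := by omega
    rw [hdt]
    exact pv_eq_blocks a fv sv f.toNat (s - f).toNat (by omega) hpre
      (fun i hi1 hi2 => hmid i hi1 (by omega))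
  | succ k ih =>
    intro a b f s t c1 c2 back hk h0f hfs hst1 htlen hblen hc1 hc2 hpre hmid htail hwin
    by_cases hst : s ≤ t
    case neg =>
      have hAx : pvLoopA a fv sv f s t = a := by rw [pvLoopA]; simp [hst]
      have hBx : pvLoopB b fv sv c1 c2 back s t = (c1, c2, back) := by
        rw [pvLoopB]; simp [hst]
      rw [hAx, hBx, hc1, hc2, ← htail]
      have hdt : (t + 1).toNat = f.toNat + (s - f).toNat := by omega
      rw [hdt]
      exact pv_eq_blocks a fv sv f.toNat (s - f).toNat (by omega) hpre
        (fun i hi1 hi2 => hmid i hi1 (by omega))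
    case pos =>
      have hs0 : (0 : Int) ≤ s := le_trans h0f hfs
      have ht0 : (0 : Int) ≤ t := le_trans hs0 hst
      have hsl : s < (a.length : Int) := by omega
      -- the value each side examines is the same: a and b agree at position s
      have hvb : PySem.List.pyGetD b s 0 = a.getD s.toNat 0 := by
        rw [PySem.List.pyGetD_of_nonneg _ _ hs0]
        exact (hwin s.toNat (le_refl _) (by omega)).symm
      have hAunf : pvLoopA a fv sv f s t =
          (if a.getD s.toNat 0 = sv then pvLoopA a fv sv f (s + 1) t
          else if a.getD s.toNat 0 = fv then pvLoopA (pvSwap a s f) fv sv (f + 1) (s + 1) t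
          else pvLoopA (pvSwap a s t) fv sv f s (t - 1)) := by
        rw [pvLoopA]
        simp only [dif_pos hst, PySem.List.pyGetD_of_nonneg _ _ hs0]
      have hBunf : pvLoopB b fv sv c1 c2 back s t =
          (if a.getD s.toNat 0 = sv then pvLoopB b fv sv c1 (c2 + 1) back (s + 1) t
          else if a.getD s.toNat 0 = fv then pvLoopB b fv sv (c1 + 1) c2 back (s + 1) t
          else pvLoopB (PySem.List.pySetD b s (PySem.List.pyGetD b t 0)) fv sv
              c1 c2 (back ++ [a.getD s.toNat 0]) s (t - 1)) := by
        rw [pvLoopB]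
        simp only [dif_pos hst, hvb]
      rw [hAunf, hBunf]
      by_cases hv1 : a.getD s.toNat 0 = sv
      · -- value == secondValue
        rw [if_pos hv1, if_pos hv1]
        refine ih a b f (s + 1) t c1 (c2 + 1) back (by omega) h0f (by omega)
          (by omega) htlen hblen hc1 (by omega) hpre ?_ htail ?_
        · intro i h1 h2
          by_cases his : i = s.toNat
          · exact his ▸ hv1
          · exact hmid i h1 (by omega)
        · intro i h1 h2
          exact hwin i (by omega) h2
      · rw [if_neg hv1, if_neg hv1]
        by_cases hv0 : a.getD s.toNat 0 = fv
        · -- value == firstValue: A swaps (s, f); B only counts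
          rw [if_pos hv0, if_pos hv0]
          have hfl : f < (a.length : Int) := by omega
          have hG := pvSwap_getD a s f hs0 h0f hsl hfl
          have hL : (pvSwap a s f).length = a.length := pvSwap_length a s f
          refine ih (pvSwap a s f) b (f + 1) (s + 1) t (c1 + 1) c2 back
            (by omega) (by omega) (by omega) (by omega) (by omega) (by omega)
            (by omega) (by omega) ?_ ?_ ?_ ?_
          · -- prefix
            intro i hi2
            rw [hG i]
            split_ifs with h3 h4
            · exact hv0
            · omega
            · exact hpre i (by omega)
          · -- middle
            intro i h1 h2
            rw [hG i]
            split_ifs with h3 h4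
            · omega
            · exact hmid f.toNat (le_refl _) (by omega)
            · exact hmid i (by omega) (by omega)
          · -- finished tail unchanged
            rw [pvSwap_drop a s f hs0 h0f (t + 1).toNat (by omega) (by omega)]
            exact htail
          · -- window [s+1, t] untouched by the swap
            intro i h1 h2
            rw [hG i]
            split_ifs with h3 h4
            · omega
            · omega
            · exact hwin i (by omega) h2
        · -- other value: A swaps (s, t); B appends to back and refills slot s from t
          rw [if_neg hv0, if_neg hv0]
          have hG := pvSwap_getD a s t hs0 ht0 hsl htlen
          have hL : (pvSwap a s t).length = a.length := pvSwap_length a s t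
          have htb : t < (b.length : Int) := by omega
          have hbset : PySem.List.pySetD b s (PySem.List.pyGetD b t 0) =
              b.set s.toNat (b.getD t.toNat 0) := by
            rw [PySem.List.pyGetD_of_nonneg _ _ ht0, PySem.List.pySetD_of_nonneg _ _ hs0]
          refine ih (pvSwap a s t) (PySem.List.pySetD b s (PySem.List.pyGetD b t 0))
            f s (t - 1) c1 c2 (back ++ [a.getD s.toNat 0])
            (by omega) h0f hfs (by omega) (by omega) ?_ hc1 hc2 ?_ ?_ ?_ ?_
          · -- length preserved
            rw [hbset]; simp [hL, hblen]
          · -- prefix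
            intro i hi2
            rw [hG i]
            split_ifs with h3 h4
            · omega
            · omega
            · exact hpre i hi2
          · -- middle
            intro i h1 h2
            rw [hG i]
            split_ifs with h3 h4
            · omega
            · omega
            · exact hmid i h1 h2
          · -- finished tail gains the stray at position t
            have hd : ((t - 1) + 1).toNat = t.toNat := by omega
            have htl : t.toNat < (pvSwap a s t).length := by omega
            rw [hd, List.drop_eq_getElem_cons htl]
            have e1 : (pvSwap a s t)[t.toNat] = a.getD s.toNat 0 := by
              rw [← List.getD_eq_getElem _ 0 htl, hG t.toNat]
              simp
            have e2 : (pvSwap a s t).drop (t.toNat + 1) = back.reverse := by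
              rw [pvSwap_drop a s t hs0 ht0 (t.toNat + 1) (by omega) (by omega)]
              rw [show t.toNat + 1 = (t + 1).toNat by omega]
              exact htail
            rw [e1, e2]
            simp
          · -- window [s, t-1]: position s got a[t] on both sides, the rest is untouched
            intro i h1 h2
            rw [hG i, hbset, pv_getD_set]
            have hnt : ¬ t.toNat = i := by omega
            by_cases his : s.toNat = i
            · have hcond : s.toNat = i ∧ s.toNat < b.length := ⟨his, by omega⟩
              rw [if_neg hnt, if_pos his, if_pos hcond]
              exact hwin t.toNat (by omega) (by omega)
            · have hcond : ¬ (s.toNat = i ∧ s.toNat < b.length) := fun h => his h.1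
              rw [if_neg hnt, if_neg his, if_neg hcond]
              exact hwin i (by omega) (by omega)

-- ===== VERDICT (by name: the statement is the Claim_ definition above) =====
theorem threeNumberSortIII_spec : Claim_equal_threeNumberSortIII := by
  intro array order _hdom hpre
  have hol : 2 ≤ order.length := hpre
  have e0 : PySem.List.pyGet? order (0 : Int) = some (order.getD 0 0) := by
    have h := PySem.List.pyGet?_natCast order 0
    rw [show ((0 : Nat) : Int) = (0 : Int) from rfl] at h
    rw [h, List.getElem?_eq_getElem (by omega), List.getD_eq_getElem _ _ (by omega)]
  have e1 : PySem.List.pyGet? order (1 : Int) = some (order.getD 1 0) := by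
    have h := PySem.List.pyGet?_natCast order 1
    rw [show ((1 : Nat) : Int) = (1 : Int) from rfl] at h
    rw [h, List.getElem?_eq_getElem (by omega), List.getD_eq_getElem _ _ (by omega)]
  simp only [Spec_threeNumberSortIII, threeNumberSortIII, threeNumberSortIII_alt, e0, e1,
    Option.bind_some, Option.map_some, Option.getD_some]
  refine pvLoop_sim (order.getD 0 0) (order.getD 1 0) array.length array array 0 0
    ((array.length : Int) - 1) 0 0 []
    (by omega) (by omega) (by omega) (by omega) (by omega) rfl rfl (by omega)
    (by intro i hi; omega)
    (by intro i h1 h2; omega)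
    ?_ (fun i _ _ => rfl)
  rw [show ((array.length : Int) - 1 + 1).toNat = array.length by omega]
  simp
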